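-- pv_equiv track=rewrite | github.com/muzych81/python_itea | hw7/longest_string.py | longest_strings
-- ===== SOURCE A (Python) =====
-- def longest_strings(list_in: list) -> list:
--     """ Функция возвращает список самых длинных строк из списка list_in """
--     max_len = 0
--     new_list = list()
--     for list_element in list_in:
--         if len(list_element) > max_len:
--             max_len = len(list_element)
--     for list_element in list_in:
--         if len(list_element) == max_len:
--             new_list.append(list_element)
--     return new_list
-- ===== SOURCE B (Python) =====
-- def longest_strings(list_in: list) -> list:
--     """Single pass: running maximum length with reset-or-append accumulator."""
--     max_len = 0
--     result = []
--     for element in list_in: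
--         n = len(element)
--         if n > max_len:
--             max_len = n
--             result = [element]
--         elif n == max_len:
--             result.append(element)
--     return result
-- ===== Notes on version B (the rewrite author's own statement) =====
-- stated objective: alternative
-- what changed: Replaces A's two scans (find max length, then collect) with one scan maintaining a running maximum and an accumulator that resets when a longer string appears.
import Mathlib
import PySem

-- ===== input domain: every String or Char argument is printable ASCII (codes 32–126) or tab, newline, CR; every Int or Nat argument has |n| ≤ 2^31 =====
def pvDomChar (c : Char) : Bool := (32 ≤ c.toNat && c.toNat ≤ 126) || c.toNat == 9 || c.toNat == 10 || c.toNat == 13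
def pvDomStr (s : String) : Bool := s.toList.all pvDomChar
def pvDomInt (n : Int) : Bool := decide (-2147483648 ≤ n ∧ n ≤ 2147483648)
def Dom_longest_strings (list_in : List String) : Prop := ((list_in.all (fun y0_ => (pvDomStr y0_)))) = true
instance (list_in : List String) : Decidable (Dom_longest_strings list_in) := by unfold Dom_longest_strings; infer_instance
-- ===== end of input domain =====

-- B replaces A's two scans with a single scan keeping a running maximum and a reset-or-append accumulator.

-- ===== PORT A =====
def longest_strings (list_in : List String) : List String :=
  let max_len : Int :=
    list_in.foldl (fun m x => if PySem.Str.len x > m then PySem.Str.len x else m) 0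
  list_in.foldl (fun acc x => if PySem.Str.len x = max_len then acc ++ [x] else acc) []

-- ===== PORT B =====
def longest_strings_alt (list_in : List String) : List String :=
  (list_in.foldl
    (fun (st : Int × List String) x =>
      let n := PySem.Str.len x
      if n > st.1 then (n, [x])
      else if n = st.1 then (st.1, st.2 ++ [x])
      else st)
    (0, [])).2

-- ===== PRECONDITION & SPEC =====
def Spec_longest_strings (list_in : List String) (out : List String) : Prop := out = longest_strings_alt list_in
instance (list_in : List String) (out : List String) : Decidable (Spec_longest_strings list_in out) := by unfold Spec_longest_strings; infer_instance

-- ===== CLAIM (what is proved, stated in full; the proofs are below) =====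
def Claim_equal_longest_strings : Prop := ∀ (list_in : List String), Dom_longest_strings list_in → Spec_longest_strings list_in (longest_strings list_in)

-- ===== LEMMAS AND PROOFS =====

-- A's first loop (running maximum), with a general start value
def pvMaxF (l : List String) (m : Int) : Int :=
  l.foldl (fun m x => if PySem.Str.len x > m then PySem.Str.len x else m) m

-- A's second loop (collect strings of length M), with a general accumulator
def pvFilt (l : List String) (M : Int) (acc : List String) : List String :=
  l.foldl (fun acc x => if PySem.Str.len x = M then acc ++ [x] else acc) acc

lemma pvMaxF_cons (x : String) (l : List String) (m : Int) :
    pvMaxF (x :: l) m = pvMaxF l (if PySem.Str.len x > m then PySem.Str.len x else m) := rfl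

lemma pvFilt_cons (x : String) (l : List String) (M : Int) (acc : List String) :
    pvFilt (x :: l) M acc = pvFilt l M (if PySem.Str.len x = M then acc ++ [x] else acc) := rfl

lemma pvMaxF_le (l : List String) (m : Int) : m ≤ pvMaxF l m := by
  induction l generalizing m with
  | nil => simp [pvMaxF]
  | cons x l ih =>
    rw [pvMaxF_cons]
    split_ifs with h
    · exact le_trans (le_of_lt h) (ih _)
    · exact ih _

-- invariant of B's single loop, expressed via A's two loops
lemma pvLoop_inv (l : List String) (m : Int) (r : List String) :
    l.foldl
      (fun (st : Int × List String) x =>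
        let n := PySem.Str.len x
        if n > st.1 then (n, [x])
        else if n = st.1 then (st.1, st.2 ++ [x])
        else st)
      (m, r)
    = (pvMaxF l m, if pvMaxF l m > m then pvFilt l (pvMaxF l m) [] else pvFilt l m r) := by
  induction l generalizing m r with
  | nil => simp [pvMaxF, pvFilt]
  | cons x l ih =>
    rw [List.foldl_cons]
    by_cases h1 : PySem.Str.len x > m
    · simp only [if_pos h1]
      rw [ih, pvMaxF_cons, if_pos h1]
      have hle := pvMaxF_le l (PySem.Str.len x)
      have hgt : pvMaxF l (PySem.Str.len x) > m := by omega
      rw [if_pos hgt, pvFilt_cons]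
      by_cases h2 : pvMaxF l (PySem.Str.len x) > PySem.Str.len x
      · rw [if_pos h2, if_neg (by omega : ¬ PySem.Str.len x = pvMaxF l (PySem.Str.len x))]
      · have heq : pvMaxF l (PySem.Str.len x) = PySem.Str.len x := le_antisymm (by omega) hle
        rw [if_neg h2, if_pos heq.symm, heq, List.nil_append]
    · simp only [if_neg h1]
      rw [pvMaxF_cons, if_neg h1]
      by_cases h2 : PySem.Str.len x = m
      · simp only [if_pos h2]
        rw [ih]
        by_cases h3 : pvMaxF l m > m
        · rw [if_pos h3, if_pos h3, pvFilt_cons,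
             if_neg (by omega : ¬ PySem.Str.len x = pvMaxF l m)]
        · rw [if_neg h3, if_neg h3, pvFilt_cons, if_pos h2]
      · simp only [if_neg h2]
        rw [ih]
        by_cases h3 : pvMaxF l m > m
        · have hle := pvMaxF_le l m
          rw [if_pos h3, if_pos h3, pvFilt_cons,
             if_neg (by omega : ¬ PySem.Str.len x = pvMaxF l m)]
        · rw [if_neg h3, if_neg h3, pvFilt_cons, if_neg h2]

-- ===== VERDICT (by name: the statement is the Claim_ definition above) =====
theorem longest_strings_spec : Claim_equal_longest_strings := by
  intro l _
  show longest_strings l = longest_strings_alt l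
  have hA : longest_strings l = pvFilt l (pvMaxF l 0) [] := rfl
  have hB : longest_strings_alt l
      = (if pvMaxF l 0 > 0 then pvFilt l (pvMaxF l 0) [] else pvFilt l 0 []) := by
    unfold longest_strings_alt
    rw [pvLoop_inv]
  rw [hA, hB]
  by_cases h : pvMaxF l 0 > 0
  · rw [if_pos h]
  · have h0 : pvMaxF l 0 = 0 := le_antisymm (by omega) (pvMaxF_le l 0)
    rw [if_neg h, h0]
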